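-- pv_equiv track=rewrite | github.com/theoliverlear/Python-Workout--50-ten-minute-exercises | exercise_seven.py | ubbi_dubbi
-- ===== SOURCE A (Python) =====
-- def ubbi_dubbi(word):
--     word_len = len(word)
--     new_word = ""
--     for i in range(word_len):
--         if word[i] == 'a' or word[i] == 'e' or word[i] == 'i' or word[i] == 'o' or word[i] == 'u':
--             new_word += "ub" + word[i]
--         else:
--             new_word += word[i]
--     return new_word
-- ===== SOURCE B (Python) =====
-- def ubbi_dubbi(word):
--     table = str.maketrans({'a': 'uba', 'e': 'ube', 'i': 'ubi', 'o': 'ubo', 'u': 'ubu'})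
--     return word.translate(table)
-- ===== Notes on version B (the rewrite author's own statement) =====
-- stated objective: idiomatic
-- what changed: Replaces the index loop with per-character branching and string accumulation by a translation table built once with str.maketrans and a single word.translate pass.
import Mathlib
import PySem

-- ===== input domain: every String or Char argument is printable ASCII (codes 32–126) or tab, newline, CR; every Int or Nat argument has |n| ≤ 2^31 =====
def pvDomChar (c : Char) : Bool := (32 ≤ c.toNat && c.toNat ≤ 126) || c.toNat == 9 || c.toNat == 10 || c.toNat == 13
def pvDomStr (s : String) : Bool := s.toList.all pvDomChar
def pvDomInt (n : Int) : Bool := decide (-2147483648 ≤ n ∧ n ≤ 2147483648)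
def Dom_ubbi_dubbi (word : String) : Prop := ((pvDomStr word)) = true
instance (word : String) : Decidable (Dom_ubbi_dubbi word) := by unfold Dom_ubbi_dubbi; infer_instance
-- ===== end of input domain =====

-- B replaces A's per-character branching/accumulation loop by a vowel→"ub"+vowel
-- translation table built once and a single table-driven pass (str.maketrans/translate).

-- ===== PORT A =====
def ubbi_dubbi (word : String) : String :=
  let s := word.toList
  let word_len : Int := PySem.Str.len word
  let new_word :=
    (PySem.List.pyRange 0 word_len 1).foldl
      (fun new_word i =>
        let c := PySem.List.pyGetD s i ' '
        if c = 'a' ∨ c = 'e' ∨ c = 'i' ∨ c = 'o' ∨ c = 'u' then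
          new_word ++ (['u', 'b'] ++ [c])
        else
          new_word ++ [c]) []
  String.ofList new_word

-- ===== PORT B =====
-- the translation table of str.maketrans({'a':'uba', …})
def ubbiTable : PySem.Dict Char (List Char) :=
  PySem.Dict.ofList
    [('a', ['u','b','a']), ('e', ['u','b','e']), ('i', ['u','b','i']),
     ('o', ['u','b','o']), ('u', ['u','b','u'])]

-- word.translate(table): each char mapped through the table, untabled chars unchanged
def ubbi_dubbi_alt (word : String) : String :=
  String.ofList (word.toList.flatMap (fun c => (PySem.Dict.get? ubbiTable c).getD [c]))

-- ===== PRECONDITION & SPEC =====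
def Spec_ubbi_dubbi (word : String) (out : String) : Prop := out = ubbi_dubbi_alt word
instance (word : String) (out : String) : Decidable (Spec_ubbi_dubbi word out) := by unfold Spec_ubbi_dubbi; infer_instance

-- ===== CLAIM (what is proved, stated in full; the proofs are below) =====
def Claim_equal_ubbi_dubbi : Prop := ∀ (word : String), Dom_ubbi_dubbi word → Spec_ubbi_dubbi word (ubbi_dubbi word)

-- ===== LEMMAS AND PROOFS =====

-- per-character agreement: A's branch equals B's table lookup
theorem ubbi_step_eq (c : Char) :
    (if c = 'a' ∨ c = 'e' ∨ c = 'i' ∨ c = 'o' ∨ c = 'u' then ['u', 'b'] ++ [c] else [c])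
      = (PySem.Dict.get? ubbiTable c).getD [c] := by
  by_cases ha : c = 'a'
  · subst ha; decide
  by_cases he : c = 'e'
  · subst he; decide
  by_cases hi : c = 'i'
  · subst hi; decide
  by_cases ho : c = 'o'
  · subst ho; decide
  by_cases hu : c = 'u'
  · subst hu; decide
  have htab : ubbiTable = PySem.Dict.mk
      [('a', ['u','b','a']), ('e', ['u','b','e']), ('i', ['u','b','i']),
       ('o', ['u','b','o']), ('u', ['u','b','u'])] := by decide
  have hnone : PySem.Dict.get? ubbiTable c = none := by
    rw [htab]
    simp [Ne.symm ha, Ne.symm he, Ne.symm hi, Ne.symm ho, Ne.symm hu,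
      PySem.Dict.get?]
  simp [hnone, ha, he, hi, ho, hu]

-- A's accumulation loop computes acc ++ flatMap of the per-character map
theorem ubbi_foldl_eq (s : List Char) (acc : List Char) :
    s.foldl
      (fun new_word c =>
        if c = 'a' ∨ c = 'e' ∨ c = 'i' ∨ c = 'o' ∨ c = 'u' then
          new_word ++ (['u', 'b'] ++ [c])
        else
          new_word ++ [c]) acc
      = acc ++ s.flatMap (fun c => (PySem.Dict.get? ubbiTable c).getD [c]) := by
  induction s generalizing acc with
  | nil => simp
  | cons c cs ih =>
    simp only [List.foldl_cons, List.flatMap_cons, ih]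
    rw [← ubbi_step_eq c]
    by_cases h : c = 'a' ∨ c = 'e' ∨ c = 'i' ∨ c = 'o' ∨ c = 'u' <;> simp [h]

-- ===== VERDICT (by name: the statement is the Claim_ definition above) =====
theorem ubbi_dubbi_spec : Claim_equal_ubbi_dubbi := by
  intro word _
  unfold Spec_ubbi_dubbi ubbi_dubbi ubbi_dubbi_alt
  simp only [PySem.Str.len_eq]
  rw [PySem.List.foldl_pyRange_zero_pyGetD' word.toList ' '
    (fun new_word c =>
      if c = 'a' ∨ c = 'e' ∨ c = 'i' ∨ c = 'o' ∨ c = 'u' then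
        new_word ++ (['u', 'b'] ++ [c])
      else
        new_word ++ [c]) []]
  rw [ubbi_foldl_eq]
  simp
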